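-- pv_equiv track=rewrite | github.com/michal-jewczuk/advent-of-code | 2020/d04_p1.py | transform_input_data
-- ===== SOURCE A (Python) =====
-- def transform_input_data(input_data):
--     data = []
--     passport_line = ''
--
--     for line in input_data:
--         if line.isspace():
--            data.append(passport_line.lstrip())
--            passport_line = ''
--         else:
--            passport_line += ' ' + line.strip()
--
--     data.append(passport_line.lstrip())
--
--     return data
-- ===== SOURCE B (Python) =====
-- def _seg(g):
--     return ''.join(' ' + l.strip() for l in g).lstrip()
--
--
-- def transform_input_data(input_data):
--     seps = [i for i, l in enumerate(input_data) if l.isspace()]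
--     starts = [0] + [i + 1 for i in seps]
--     ends = seps + [len(input_data)]
--     return [_seg(input_data[a:b]) for a, b in zip(starts, ends)]
-- ===== Notes on version B (the rewrite author's own statement) =====
-- stated objective: alternative
-- what changed: A threads a growing passport-line string through one stateful loop; B first collects the indices of the whitespace separator lines, derives start/end bounds, and then slices each block out and joins it independently.
import Mathlib
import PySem

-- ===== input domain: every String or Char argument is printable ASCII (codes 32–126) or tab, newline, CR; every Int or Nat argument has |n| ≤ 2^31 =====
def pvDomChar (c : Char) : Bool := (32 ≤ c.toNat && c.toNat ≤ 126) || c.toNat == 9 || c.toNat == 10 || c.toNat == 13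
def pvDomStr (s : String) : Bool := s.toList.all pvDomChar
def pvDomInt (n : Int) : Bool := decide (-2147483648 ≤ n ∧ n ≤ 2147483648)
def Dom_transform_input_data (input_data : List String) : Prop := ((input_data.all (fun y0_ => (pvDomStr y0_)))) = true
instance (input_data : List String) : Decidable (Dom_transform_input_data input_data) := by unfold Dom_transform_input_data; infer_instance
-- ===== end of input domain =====

-- B replaces A's single accumulator loop by an index pass (collect separator positions) plus
-- one slice-and-join per block; alternative decomposition, same cost.

-- ===== PORT A =====
-- literal transliteration of A's for-loop: state (data, passport_line), final append after the loop
def transform_input_data (input_data : List String) : List String :=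
  let st := input_data.foldl
    (fun (acc : List String × String) line =>
      if PySem.Str.strIsspace line then
        (acc.1 ++ [PySem.Str.lstrip acc.2], "")
      else
        (acc.1, acc.2 ++ (" " ++ PySem.Str.strip line))) ([], "")
  st.1 ++ [PySem.Str.lstrip st.2]

-- ===== PORT B =====
-- ''.join(' ' + l.strip() for l in g)
def tidBody (g : List String) : String :=
  PySem.Str.join "" (g.map (fun l => " " ++ PySem.Str.strip l))

-- _seg(g) of Source B
def tidSeg (g : List String) : String :=
  PySem.Str.lstrip (tidBody g)

-- Source B: separator indices, start/end bounds, one slice per block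
def transform_input_data_alt (input_data : List String) : List String :=
  let seps : List Int :=
    ((PySem.List.enumerate input_data).filter (fun p => PySem.Str.strIsspace p.2)).map (·.1)
  let starts : List Int := 0 :: seps.map (· + 1)
  let ends : List Int := seps ++ [(input_data.length : Int)]
  (starts.zip ends).map (fun p => tidSeg (PySem.List.slice input_data (some p.1) (some p.2)))

-- ===== PRECONDITION & SPEC =====
def Spec_transform_input_data (input_data : List String) (out : List String) : Prop := out = transform_input_data_alt input_data
instance (input_data : List String) (out : List String) : Decidable (Spec_transform_input_data input_data out) := by unfold Spec_transform_input_data; infer_instance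

-- ===== CLAIM (what is proved, stated in full; the proofs are below) =====
def Claim_equal_transform_input_data : Prop := ∀ (input_data : List String), Dom_transform_input_data input_data → Spec_transform_input_data input_data (transform_input_data input_data)

-- ===== LEMMAS AND PROOFS =====

-- A's loop step, as a named function (definitionally the lambda in the port)
def tidStep (acc : List String × String) (line : String) : List String × String :=
  if PySem.Str.strIsspace line then
    (acc.1 ++ [PySem.Str.lstrip acc.2], "")
  else
    (acc.1, acc.2 ++ (" " ++ PySem.Str.strip line))

-- the list of blocks (first block, remaining blocks): the common spec both ports reduce to
def tidG : List String → List String × List (List String)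
  | [] => ([], [])
  | l :: ls =>
    let r := tidG ls
    if PySem.Str.strIsspace l then ([], r.1 :: r.2) else (l :: r.1, r.2)

-- separator indices as naturals
def tidSeps : List String → List Nat
  | [] => []
  | l :: ls =>
    if PySem.Str.strIsspace l then 0 :: (tidSeps ls).map (· + 1)
    else (tidSeps ls).map (· + 1)

lemma tidBody_nil : tidBody [] = "" := rfl

lemma tidBody_cons (l : String) (g : List String) :
    tidBody (l :: g) = (" " ++ PySem.Str.strip l) ++ tidBody g := by
  apply String.toList_inj.mp
  cases g with
  | nil =>
    simp [tidBody, PySem.Str.toList_join, PySem.Chars.join_nil, PySem.Chars.join_singleton]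
  | cons b bs =>
    simp [tidBody, PySem.Str.toList_join, PySem.Chars.join_cons_cons]

-- A's loop, fully characterised by tidG
lemma tid_loopA (ls : List String) : ∀ (data : List String) (pl : String),
    (ls.foldl tidStep (data, pl)).1 ++ [PySem.Str.lstrip (ls.foldl tidStep (data, pl)).2]
    = data ++ PySem.Str.lstrip (pl ++ tidBody (tidG ls).1)
        :: (tidG ls).2.map (fun g => PySem.Str.lstrip (tidBody g)) := by
  induction ls with
  | nil =>
    intro data pl
    simp [tidG, tidBody_nil, String.append_empty]
  | cons l ls ih =>
    intro data pl
    by_cases h : PySem.Chars.strIsspace l.toList = true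
    · rw [List.foldl_cons, show tidStep (data, pl) l = (data ++ [PySem.Str.lstrip pl], "") by
        simp [tidStep, h]]
      rw [ih (data ++ [PySem.Str.lstrip pl]) ""]
      simp [tidG, h, tidBody_nil, String.empty_append]
    · rw [List.foldl_cons, show tidStep (data, pl) l
          = (data, pl ++ (" " ++ PySem.Str.strip l)) by simp [tidStep, h]]
      rw [ih data (pl ++ (" " ++ PySem.Str.strip l))]
      simp [tidG, h, tidBody_cons, String.append_assoc]

-- the Int separator indices computed by the port are tidSeps, shifted by the enumerate start
lemma tid_seps_eq (ls : List String) : ∀ (s : Nat),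
    ((PySem.List.enumerate ls (s : Int)).filter (fun p => PySem.Str.strIsspace p.2)).map (·.1)
    = (tidSeps ls).map (fun k => ((k + s : Nat) : Int)) := by
  induction ls with
  | nil => intro s; simp [PySem.List.enumerate, tidSeps]
  | cons l ls ih =>
    intro s
    rw [PySem.List.enumerate_cons,
        show ((s : Int) + 1) = ((s + 1 : Nat) : Int) by push_cast; ring]
    by_cases h : PySem.Str.strIsspace l = true
    · rw [List.filter_cons]
      simp only [h, if_pos, List.map_cons, ih (s + 1), tidSeps, List.map_map]
      refine List.cons_eq_cons.mpr ⟨by omega, List.map_congr_left ?_⟩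
      intro x _
      simp only [Function.comp_apply]
      omega
    · rw [List.filter_cons]
      simp only [h, ih (s + 1), tidSeps, List.map_map, if_neg,
        Bool.false_eq_true, not_false_iff]
      refine List.map_congr_left ?_
      intro x _
      simp only [Function.comp_apply]
      omega

-- the slices cut at tidSeps are exactly the blocks of tidG
lemma tid_slices (ls : List String) :
    ((0 :: (tidSeps ls).map (· + 1)).zip (tidSeps ls ++ [ls.length])).map
      (fun p : Nat × Nat => List.take (p.2 - p.1) (List.drop p.1 ls))
    = (tidG ls).1 :: (tidG ls).2 := by
  induction ls with
  | nil => simp [tidSeps, tidG]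
  | cons l ls ih =>
    by_cases h : PySem.Str.strIsspace l = true
    · simp only [tidSeps, h, if_pos, tidG, List.length_cons]
      rw [List.cons_append, List.zip_cons_cons, List.map_cons,
          show (tidSeps ls).map (· + 1) ++ [ls.length + 1]
              = ((tidSeps ls) ++ [ls.length]).map (· + 1) by simp,
          List.zip_map, List.map_map]
      refine List.cons_eq_cons.mpr ⟨rfl, ?_⟩
      rw [← ih]
      refine List.map_congr_left ?_
      intro p _
      simp [Prod.map, Nat.add_sub_add_right]
    · simp only [tidSeps, h, if_neg, tidG, List.length_cons, Bool.false_eq_true,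
        not_false_iff]
      rcases hE : tidSeps ls ++ [ls.length] with _ | ⟨e, es⟩
      · simp at hE
      · rw [hE] at ih
        rw [List.zip_cons_cons] at ih
        simp only [List.map_cons, Nat.sub_zero, List.drop_zero] at ih
        obtain ⟨ih1, ih2⟩ := List.cons.injEq .. ▸ ih
        rw [show (tidSeps ls).map (· + 1) ++ [ls.length + 1] = (e :: es).map (· + 1) by
              rw [← hE]; simp,
            List.map_cons, List.map_map, List.zip_cons_cons, List.map_cons]
        refine List.cons_eq_cons.mpr ⟨?_, ?_⟩
        · simp only [Nat.sub_zero, List.drop_zero, List.take_succ_cons, ih1]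
        · rw [← ih2, List.zip_map, List.zip_map_left]
          simp only [List.map_map]
          refine List.map_congr_left ?_
          intro p _
          cases p with
          | mk a b =>
            simp only [Function.comp_apply, Prod.map, id, List.drop_succ_cons]
            congr 1
            omega

-- ===== VERDICT (by name: the statement is the Claim_ definition above) =====
theorem transform_input_data_spec : Claim_equal_transform_input_data := by
  intro ls _
  show transform_input_data ls = transform_input_data_alt ls
  -- A's side: the loop characterisation at data = [], pl = ""
  have hA : transform_input_data ls
      = PySem.Str.lstrip ("" ++ tidBody (tidG ls).1)
        :: (tidG ls).2.map (fun g => PySem.Str.lstrip (tidBody g)) := by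
    have h := tid_loopA ls [] ""
    simpa using h
  -- B's side
  have hseps : ((PySem.List.enumerate ls).filter (fun p => PySem.Str.strIsspace p.2)).map (·.1)
      = (tidSeps ls).map (fun k : Nat => (k : Int)) := by
    have h := tid_seps_eq ls 0
    simp only [Nat.add_zero, Nat.cast_zero] at h
    exact h
  have h1 : (0 : Int) :: ((tidSeps ls).map (fun k : Nat => (k : Int))).map (· + 1)
      = ((0 :: (tidSeps ls).map (· + 1)).map (fun k : Nat => (k : Int))) := by
    rw [List.map_cons, Nat.cast_zero, List.map_map, List.map_map]
    refine List.cons_eq_cons.mpr ⟨rfl, List.map_congr_left ?_⟩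
    intro x _
    simp only [Function.comp_apply]
    push_cast
    ring
  have h2 : (tidSeps ls).map (fun k : Nat => (k : Int)) ++ [(ls.length : Int)]
      = ((tidSeps ls) ++ [ls.length]).map (fun k : Nat => (k : Int)) := by
    simp only [List.map_append, List.map_cons, List.map_nil]
  have h3 : ((fun p : Int × Int => tidSeg (PySem.List.slice ls (some p.1) (some p.2))) ∘
        Prod.map (fun k : Nat => (k : Int)) (fun k : Nat => (k : Int)))
      = (fun p : Nat × Nat => tidSeg (List.take (p.2 - p.1) (List.drop p.1 ls))) := by
    funext p
    cases p with
    | mk a b =>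
      simp only [Function.comp_apply, Prod.map]
      rw [PySem.List.slice_natCast]
  have hB : transform_input_data_alt ls
      = tidSeg (tidG ls).1 :: (tidG ls).2.map tidSeg := by
    show ((0 :: (((PySem.List.enumerate ls).filter
            (fun p => PySem.Str.strIsspace p.2)).map (·.1)).map (· + 1)).zip
          (((PySem.List.enumerate ls).filter
            (fun p => PySem.Str.strIsspace p.2)).map (·.1) ++ [(ls.length : Int)])).map
        (fun p => tidSeg (PySem.List.slice ls (some p.1) (some p.2)))
      = tidSeg (tidG ls).1 :: (tidG ls).2.map tidSeg
    rw [hseps, h1, h2, List.zip_map, List.map_map, h3,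
        show (fun p : Nat × Nat => tidSeg (List.take (p.2 - p.1) (List.drop p.1 ls)))
          = tidSeg ∘ (fun p : Nat × Nat => List.take (p.2 - p.1) (List.drop p.1 ls)) from rfl,
        ← List.map_map, tid_slices, List.map_cons]
  rw [hA, hB]
  simp [tidSeg, String.empty_append]
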